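-- pv_equiv track=rewrite | github.com/miliar/Code_Jam_Webscraper | solutions_python/Problem_156/672.py | fori
-- ===== SOURCE A (Python) =====
-- def getToN(dishList,n):
--     sum = 0
--     for i in dishList:
--         if i > n:
--             sum += (i-1)//n
--     return sum
--
-- def fori(dishList,maxi):
--     result = []
--     if maxi == 1:
--         return 1
--     for i in range(1,maxi):
--         #tempList = deepcopy(dishList)
--         tempSum = getToN(dishList,i)
--         result.append(tempSum+i)
--     return min(min(result),maxi)
-- ===== SOURCE B (Python) =====
-- def fori(dishList, maxi):
--     if maxi == 1:
--         return 1
--     # difference array over heights 1..maxi-1; each dish adds its (v-1)//i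
--     # contribution in O(sqrt(v)) divisor blocks instead of per-i
--     diff = [0] * (maxi + 1)
--     for v in dishList:
--         if v > 1:
--             a = v - 1
--             m = min(a, maxi - 1)
--             i = 1
--             while i <= m:
--                 q = a // i
--                 r = min(m, a // q)
--                 diff[i] += q
--                 diff[r + 1] -= q
--                 i = r + 1
--     best = maxi
--     s = 0
--     for i in range(1, maxi):
--         s += diff[i]
--         if s + i < best:
--             best = s + i
--     return best
-- ===== Notes on version B (the rewrite author's own statement) =====
-- stated objective: alternative
-- what changed: Instead of recomputing getToN from scratch for every height i (O(maxi*D)), B decomposes each dish's contribution (v-1)//i into constant-quotient divisor blocks recorded in a difference array and recovers all per-height totals with one prefix-sum sweep; intended as faster (O(D*min(sqrt(maxV),maxi)+maxi)), measured 1.9-3.4x on a timing run's sizes but unconfirmed at the largest size, so not claimed.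
import Mathlib
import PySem

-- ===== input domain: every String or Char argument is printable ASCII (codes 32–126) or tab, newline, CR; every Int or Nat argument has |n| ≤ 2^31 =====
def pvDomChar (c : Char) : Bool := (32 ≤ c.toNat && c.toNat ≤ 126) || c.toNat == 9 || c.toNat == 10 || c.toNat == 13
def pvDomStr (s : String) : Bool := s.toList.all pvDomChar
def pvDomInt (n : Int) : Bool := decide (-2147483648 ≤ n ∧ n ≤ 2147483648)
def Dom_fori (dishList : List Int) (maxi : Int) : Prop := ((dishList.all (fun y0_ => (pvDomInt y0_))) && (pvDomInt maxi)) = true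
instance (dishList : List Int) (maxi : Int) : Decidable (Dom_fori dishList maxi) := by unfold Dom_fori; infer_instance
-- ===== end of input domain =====

-- B replaces A's per-height rescan of all dishes by a per-dish divisor-block
-- decomposition into a difference array plus one prefix-sum sweep over the heights.


-- ===== PORT A =====
def getToN (dishList : List Int) (n : Int) : Int :=
  dishList.foldl (fun sum i => if i > n then sum + PySem.Int.floordiv (i - 1) n else sum) 0

def fori (dishList : List Int) (maxi : Int) : Int :=
  if maxi = 1 then 1
  else
    -- result.append(x) is O(1) in Python; encoded as cons + one final reverse (same list)
    let result := ((PySem.List.pyRange 1 maxi 1).foldl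
      (fun res i => (getToN dishList i + i) :: res) ([] : List Int)).reverse
    match PySem.List.min? result (fun x => x) with
    | some x => min x maxi
    | none => 0   -- Python raises ValueError on min([]) here (maxi ≤ 0); excluded by Pre_fori

-- ===== PORT B =====
-- the inner while loop of Source B; the hypotheses 1 ≤ i and m ≤ a (invariants of the
-- Python loop, which starts at i = 1 with m = min(a, maxi-1)) only serve termination
def blockLoop (a m : Int) (ha : m ≤ a) (i : Int) (hi : 1 ≤ i) (diff : Array Int) : Array Int :=
  if h : i ≤ m then
    let q := PySem.Int.floordiv a i
    let r := min m (PySem.Int.floordiv a q)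
    -- diff[i] += q; diff[r+1] -= q  (both indices are ≥ 1 here, so .toNat is exact)
    let diff1 := diff.setIfInBounds i.toNat (diff.getD i.toNat 0 + q)
    let diff2 := diff1.setIfInBounds (r + 1).toNat (diff1.getD (r + 1).toNat 0 - q)
    have hq : 0 < q := by
      have := PySem.Int.le_floordiv_iff_mul_le (a := a) (b := i) (q := 1) (by omega)
      simp only [q]; omega
    have hr0 : 0 ≤ r := le_min (by omega) (by
      have := PySem.Int.le_floordiv_iff_mul_le (a := a) (b := q) (q := 0) hq
      omega)
    blockLoop a m ha (r + 1) (by omega) diff2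
  else diff
termination_by (m + 1 - i).toNat
decreasing_by
  have hq : 0 < PySem.Int.floordiv a i := by
    have := PySem.Int.le_floordiv_iff_mul_le (a := a) (b := i) (q := 1) (by omega)
    omega
  have key : PySem.Int.floordiv a i * i ≤ a := by
    have h1 := PySem.Int.floordiv_mul_add_mod a i
    have h2 := PySem.Int.mod_nonneg a (b := i) (by omega)
    omega
  have hr : i ≤ PySem.Int.floordiv a (PySem.Int.floordiv a i) := by
    rw [PySem.Int.le_floordiv_iff_mul_le hq]
    nlinarith
  have _hir : i ≤ r := le_min h hr
  omega

def fori_alt (dishList : List Int) (maxi : Int) : Int :=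
  if maxi = 1 then 1
  else
    let diff0 : Array Int := Array.replicate (maxi + 1).toNat 0
    let diff := dishList.foldl (fun d v =>
      if 1 < v then
        blockLoop (v - 1) (min (v - 1) (maxi - 1)) (min_le_left _ _) 1 le_rfl d
      else d) diff0
    let sb := (PySem.List.pyRange 1 maxi 1).foldl
      (fun (sb : Int × Int) i =>
        let s := sb.1 + diff.getD i.toNat 0
        (s, if s + i < sb.2 then s + i else sb.2)) (0, maxi)
    sb.2

-- ===== PRECONDITION & SPEC =====
-- Pre_fori excludes exactly maxi ≤ 0, where A raises ValueError (min of the empty result list).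
def Pre_fori (dishList : List Int) (maxi : Int) : Prop := 1 ≤ maxi
instance (dishList : List Int) (maxi : Int) : Decidable (Pre_fori dishList maxi) := by unfold Pre_fori; infer_instance
def pvWitness_fori : List Int × Int := ([3, 10, 7], 5)

def Spec_fori (dishList : List Int) (maxi : Int) (out : Int) : Prop := out = fori_alt dishList maxi
instance (dishList : List Int) (maxi : Int) (out : Int) : Decidable (Spec_fori dishList maxi out) := by unfold Spec_fori; infer_instance

-- ===== CLAIM (what is proved, stated in full; the proofs are below) =====
def Claim_equal_fori : Prop := ∀ (dishList : List Int) (maxi : Int), Dom_fori dishList maxi → Pre_fori dishList maxi → Spec_fori dishList maxi (fori dishList maxi)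

-- ===== LEMMAS AND PROOFS =====

-- pref diff k = the running prefix sum diff[1] + ... + diff[k] of the difference array
def pref (diff : Array Int) (k : Int) : Int :=
  ((PySem.List.pyRange 1 (k + 1) 1).map (fun j => diff.getD j.toNat 0)).sum

-- L0 spike sum
lemma spike_sum (l : List Int) (j q : Int) (h : l.Nodup) :
    (l.map (fun t => if t = j then q else 0)).sum = if j ∈ l then q else 0 := by
  induction l with
  | nil => simp
  | cons x t ih =>
    simp only [List.nodup_cons] at h
    by_cases hx : x = j
    · subst hx
      simp [ih h.2, h.1]
    · have hjx : ¬ j = x := fun hh => hx hh.symm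
      simp [ih h.2, hx, hjx, List.mem_cons]

-- L1
lemma pref_replicate (n : Nat) (k : Int) : pref (Array.replicate n 0) k = 0 := by
  have h0 : ∀ j : Int, (Array.replicate n (0:Int)).getD j.toNat 0 = 0 := by
    intro j
    rw [Array.getD_eq_getD_getElem?, Array.getElem?_replicate]
    split <;> simp
  simp [pref, h0]

-- L2
lemma pref_succ (diff : Array Int) (j : Int) (h : 1 ≤ j) :
    pref diff j = pref diff (j - 1) + diff.getD j.toNat 0 := by
  have : pref diff j = ((PySem.List.pyRange 1 j 1 ++ [j]).map (fun t => diff.getD t.toNat 0)).sum := by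
    rw [pref, ← PySem.List.pyRange_one_succ_right h]
  rw [this, List.map_append, List.sum_append]
  simp [pref]

-- L3
lemma pref_setD_add (diff : Array Int) (j q k : Int) (h1 : 1 ≤ j) (hlen : j < (diff.size : Int)) :
    pref (diff.setIfInBounds j.toNat (diff.getD j.toNat 0 + q)) k
      = pref diff k + (if j ≤ k then q else 0) := by
  have hjl : j.toNat < diff.size := by omega
  have key : ∀ t : Int, 1 ≤ t →
      (diff.setIfInBounds j.toNat (diff.getD j.toNat 0 + q)).getD t.toNat 0
        = diff.getD t.toNat 0 + (if t = j then q else 0) := by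
    intro t ht
    rw [Array.getD_eq_getD_getElem?, Array.getElem?_setIfInBounds]
    by_cases he : t = j
    · have hn : j.toNat = t.toNat := by omega
      rw [if_pos hn, if_pos (by omega : j.toNat < diff.size), if_pos he, he]
      simp
    · have hn : j.toNat ≠ t.toNat := by omega
      rw [if_neg hn, if_neg he, add_zero, Array.getD_eq_getD_getElem?]
  have hmap : (PySem.List.pyRange 1 (k + 1) 1).map
        (fun t => (diff.setIfInBounds j.toNat (diff.getD j.toNat 0 + q)).getD t.toNat 0)
      = (PySem.List.pyRange 1 (k + 1) 1).map
        (fun t => diff.getD t.toNat 0 + (if t = j then q else 0)) := by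
    apply List.map_congr_left
    intro t htm
    exact key t ((PySem.List.mem_pyRange_one.mp htm).1)
  rw [pref, hmap, PySem.List.sum_map_add_int, spike_sum _ _ _ (PySem.List.nodup_pyRange_one _ _), ← pref]
  congr 1
  by_cases hc : j ≤ k
  · rw [if_pos (PySem.List.mem_pyRange_one.mpr ⟨h1, by omega⟩), if_pos hc]
  · rw [if_neg (fun hm => hc (by have := PySem.List.mem_pyRange_one.mp hm; omega)), if_neg hc]

lemma blockLoop_size (a m : Int) (ha : m ≤ a) (i : Int) (hi : 1 ≤ i) (diff : Array Int) :
    (blockLoop a m ha i hi diff).size = diff.size := by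
  fun_induction blockLoop with
  | case1 i hi diff h q r d1 d2 hq hr0 ih =>
      rw [ih]
      simp [d2, d1, Array.size_setIfInBounds]
  | case2 => rfl

lemma blockLoop_pref (a m : Int) (ha : m ≤ a) (i : Int) (hi : 1 ≤ i) (diff : Array Int) :
    ∀ k : Int, m + 1 < (diff.size : Int) →
    pref (blockLoop a m ha i hi diff) k
      = pref diff k + (if i ≤ k ∧ k ≤ m then PySem.Int.floordiv a k else 0) := by
  fun_induction blockLoop with
  | case1 i hi diff h q r d1 d2 hq hr0 ih =>
      intro k hlen
      have hqd : q = PySem.Int.floordiv a i := rfl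
      have hrd : r = min m (PySem.Int.floordiv a q) := rfl
      have hrm : r ≤ m := by rw [hrd]; exact min_le_left _ _
      have key : q * i ≤ a := by
        have h1 := PySem.Int.floordiv_mul_add_mod a i
        have h2 := PySem.Int.mod_nonneg a (b := i) (by omega)
        rw [hqd]; omega
      have hir : i ≤ r := by
        rw [hrd]
        refine le_min h ?_
        rw [PySem.Int.le_floordiv_iff_mul_le hq, mul_comm]
        exact key
      have hl1 : (d1.size : Int) = (diff.size : Int) := by
        simp [d1, Array.size_setIfInBounds]
      have hl2 : (d2.size : Int) = (diff.size : Int) := by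
        simp [d2, d1, Array.size_setIfInBounds]
      have e1 : pref d1 k = pref diff k + (if i ≤ k then q else 0) :=
        pref_setD_add diff i q k hi (by omega)
      have e2 : pref d2 k = pref d1 k + (if r + 1 ≤ k then -q else 0) := by
        have := pref_setD_add d1 (r + 1) (-q) k (by omega) (by omega)
        rw [← sub_eq_add_neg] at this
        exact this
      have hmid : ∀ k' : Int, i ≤ k' → k' ≤ r → PySem.Int.floordiv a k' = q := by
        intro k' h1 h2
        have hk0 : (0:Int) < k' := by omega
        have hfi := (PySem.Int.floordiv_eq_iff_of_pos (a := a) (b := i) (q := q) (by omega)).mp hqd.symm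
        rw [PySem.Int.floordiv_eq_iff_of_pos hk0]
        constructor
        · have h3 : k' ≤ PySem.Int.floordiv a q := le_trans h2 (hrd ▸ min_le_right _ _)
          have := (PySem.Int.le_floordiv_iff_mul_le (a := a) (b := q) (q := k') hq).mp h3
          nlinarith
        · nlinarith [hfi.1, hfi.2]
      rw [ih k (by omega), e2, e1]
      rcases le_or_gt i k with c1 | c1
      · rcases le_or_gt k r with c2 | c2
        · rw [if_pos c1, if_neg (by omega : ¬ r + 1 ≤ k),
              if_neg (by omega : ¬ (r + 1 ≤ k ∧ k ≤ m)),
              if_pos (⟨c1, by omega⟩ : i ≤ k ∧ k ≤ m),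
              hmid k c1 c2]
          ring
        · rw [if_pos c1, if_pos (by omega : r + 1 ≤ k)]
          by_cases c3 : k ≤ m
          · rw [if_pos (⟨by omega, c3⟩ : r + 1 ≤ k ∧ k ≤ m), if_pos (⟨c1, c3⟩ : i ≤ k ∧ k ≤ m)]
            ring
          · rw [if_neg (by omega : ¬ (r + 1 ≤ k ∧ k ≤ m)), if_neg (by omega : ¬ (i ≤ k ∧ k ≤ m))]
            ring
      · rw [if_neg (by omega : ¬ i ≤ k), if_neg (by omega : ¬ r + 1 ≤ k),
            if_neg (by omega : ¬ (r + 1 ≤ k ∧ k ≤ m)), if_neg (by omega : ¬ (i ≤ k ∧ k ≤ m))]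
        ring
  | case2 i hi diff h =>
      intro k hlen
      rw [if_neg (by omega : ¬ (i ≤ k ∧ k ≤ m))]
      ring

lemma getToN_eq_sum (dl : List Int) (n : Int) :
    getToN dl n = (dl.map (fun v => if v > n then PySem.Int.floordiv (v - 1) n else 0)).sum := by
  unfold getToN
  rw [PySem.List.foldl_congr_mem' dl _
      (fun s v => s + (if v > n then PySem.Int.floordiv (v - 1) n else 0)) 0
      (by intro x hx acc; by_cases h : x > n <;> simp [h])]
  rw [PySem.List.foldl_add]
  simp

lemma build_pref (maxi : Int) (dl : List Int) :
    ∀ (diff : Array Int), maxi < (diff.size : Int) → ∀ k, 1 ≤ k → k ≤ maxi - 1 →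
    pref (dl.foldl (fun d v =>
        if 1 < v then blockLoop (v - 1) (min (v - 1) (maxi - 1)) (min_le_left _ _) 1 le_rfl d
        else d) diff) k
      = pref diff k + getToN dl k := by
  induction dl with
  | nil => intro diff hlen k hk1 hk2; simp [getToN]
  | cons v t ih =>
    intro diff hlen k hk1 hk2
    rw [List.foldl_cons]
    by_cases hv : 1 < v
    · rw [if_pos hv]
      have hlen2 : maxi <
          ((blockLoop (v - 1) (min (v - 1) (maxi - 1)) (min_le_left _ _) 1 le_rfl diff).size : Int) := by
        rw [blockLoop_size]; exact hlen
      rw [ih _ hlen2 k hk1 hk2]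
      rw [blockLoop_pref _ _ _ _ _ _ k (by
        have := min_le_right (v - 1) (maxi - 1); omega)]
      simp only [getToN_eq_sum, List.map_cons, List.sum_cons]
      have hcond : (1 ≤ k ∧ k ≤ min (v - 1) (maxi - 1)) ↔ v > k := by omega
      by_cases hc : v > k
      · rw [if_pos (hcond.mpr hc), if_pos hc]; ring
      · rw [if_neg (fun hh => hc (hcond.mp hh)), if_neg hc]; ring
    · rw [if_neg hv]
      rw [ih _ hlen k hk1 hk2]
      simp only [getToN_eq_sum, List.map_cons, List.sum_cons]
      rw [if_neg (by omega : ¬ v > k)]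
      ring

lemma if_lt_eq_min (b x : Int) : (if x < b then x else b) = min b x := by
  rw [Int.min_def]; split_ifs <;> omega

lemma sweep (diff : Array Int) (maxi : Int) :
    ∀ (n : Nat) (j : Int), j = 1 + (n : Int) → j ≤ maxi →
    (PySem.List.pyRange 1 j 1).foldl
      (fun (sb : Int × Int) i =>
        (sb.1 + diff.getD i.toNat 0,
         if sb.1 + diff.getD i.toNat 0 + i < sb.2 then sb.1 + diff.getD i.toNat 0 + i
         else sb.2)) (0, maxi)
    = (pref diff (j - 1),
       (PySem.List.pyRange 1 j 1).foldl (fun b i => min b (pref diff i + i)) maxi) := by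
  intro n
  induction n with
  | zero =>
    intro j hj hjm
    subst hj
    norm_num [PySem.List.pyRange_one_eq_nil le_rfl, pref, PySem.List.pyRange_one_eq_nil]
  | succ n ih =>
    intro j hj hjm
    have h1n : (1 : Int) ≤ 1 + (n : Int) := by omega
    have hsplit : PySem.List.pyRange 1 j 1 = PySem.List.pyRange 1 (j - 1) 1 ++ [j - 1] := by
      have : j = (j - 1) + 1 := by omega
      rw [this, PySem.List.pyRange_one_succ_right (by omega)]
      norm_num
    rw [hsplit, List.foldl_append, List.foldl_append,
        ih (j - 1) (by omega) (by omega)]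
    simp only [List.foldl_cons, List.foldl_nil]
    have hps : pref diff (j - 1 - 1) + diff.getD (j - 1).toNat 0 = pref diff (j - 1) :=
      (pref_succ diff (j - 1) (by omega)).symm
    rw [Prod.mk.injEq]
    constructor
    · exact hps
    · rw [hps, if_lt_eq_min]

lemma foldl_min_pull (t : List Int) : ∀ a b : Int, t.foldl min (min a b) = min (t.foldl min a) b := by
  induction t with
  | nil => intro a b; rfl
  | cons x t ih =>
    intro a b
    simp only [List.foldl_cons]
    rw [min_right_comm a b x, ih]

-- A and B agree on every input with maxi ≥ 1
lemma main : ∀ dl maxi, 1 ≤ maxi → fori dl maxi = fori_alt dl maxi := by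
  intro dl maxi hpre
  by_cases hm1 : maxi = 1
  · simp [fori, fori_alt, hm1]
  · have h2 : 2 ≤ maxi := by omega
    have hA : fori dl maxi
        = (PySem.List.pyRange 1 maxi 1).foldl (fun b i => min b (getToN dl i + i)) maxi := by
      unfold fori
      rw [if_neg hm1, List.foldl_flip_cons_eq_append, List.append_nil, List.reverse_reverse]
      rw [PySem.List.pyRange_one_cons (by omega : (1:Int) < maxi)]
      simp only [List.map_cons, PySem.List.min?_id_cons, List.foldl_cons]
      rw [← List.foldl_map (f := fun i => getToN dl i + i) (g := min),
          min_comm maxi (getToN dl 1 + 1)]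
      exact (foldl_min_pull _ _ _).symm
    rw [hA]
    simp only [fori_alt, if_neg hm1]
    have hs := congrArg Prod.snd (sweep (dl.foldl (fun d v =>
        if 1 < v then blockLoop (v - 1) (min (v - 1) (maxi - 1)) (min_le_left _ _) 1 le_rfl d
        else d) (Array.replicate (maxi + 1).toNat (0:Int))) maxi ((maxi - 1).toNat) maxi (by omega) le_rfl)
    dsimp only at hs
    rw [hs]
    have hlen0 : maxi < ((Array.replicate (maxi + 1).toNat (0 : Int)).size : Int) := by
      simp [Array.size_replicate]
    refine PySem.List.foldl_congr_mem _ _ _ _ ?_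
    intro b i hi
    have hmem := PySem.List.mem_pyRange_one.mp hi
    have hpref : pref (dl.foldl (fun d v =>
        if 1 < v then blockLoop (v - 1) (min (v - 1) (maxi - 1)) (min_le_left _ _) 1 le_rfl d
        else d) (Array.replicate (maxi + 1).toNat 0)) i = getToN dl i := by
      rw [build_pref maxi dl _ hlen0 i (by omega) (by omega), pref_replicate, zero_add]
    rw [hpref]

-- ===== VERDICT (by name: the statement is the Claim_ definition above) =====
theorem fori_spec : Claim_equal_fori := by
  intro dishList maxi _ hpre
  exact main dishList maxi hpre
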